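-- pv_equiv track=rewrite | github.com/VadimPY2143/Parser_test_task | app/hotline.py | _pick_offer_url_from_links
-- ===== SOURCE A (Python) =====
-- def _pick_offer_url_from_links(links: list[dict]) -> str | None:
--     for link in links:
--         href = link.get("href") or ""
--         if "hotline.ua/go/" in href or "/go/" in href:
--             return href
--     for link in links:
--         href = link.get("href") or ""
--         if href:
--             return href
--     return None
-- ===== SOURCE B (Python) =====
-- def _pick_offer_url_from_links(links: list[dict]) -> str | None:
--     fallback = None
--     for link in links:
--         href = link.get("href") or ""
--         if "/go/" in href:
--             return href
--         if fallback is None and href: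
--             fallback = href
--     return fallback
-- ===== Notes on version B (the rewrite author's own statement) =====
-- stated objective: simpler
-- what changed: Replaces A's two sequential scans with one pass that returns a '/go/' href eagerly and remembers the first non-empty href as a fallback; the redundant 'hotline.ua/go/' test (subsumed by '/go/') is dropped.
import Mathlib
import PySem

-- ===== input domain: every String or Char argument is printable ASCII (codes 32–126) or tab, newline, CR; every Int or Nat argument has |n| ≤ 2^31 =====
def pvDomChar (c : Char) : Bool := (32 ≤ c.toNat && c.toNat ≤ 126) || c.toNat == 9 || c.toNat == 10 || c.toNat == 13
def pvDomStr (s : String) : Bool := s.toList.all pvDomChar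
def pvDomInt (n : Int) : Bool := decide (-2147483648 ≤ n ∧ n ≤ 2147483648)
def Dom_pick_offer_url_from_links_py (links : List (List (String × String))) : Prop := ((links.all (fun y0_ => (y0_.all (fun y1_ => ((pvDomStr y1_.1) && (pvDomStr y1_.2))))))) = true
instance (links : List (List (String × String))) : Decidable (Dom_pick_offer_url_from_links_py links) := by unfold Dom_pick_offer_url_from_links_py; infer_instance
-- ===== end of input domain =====

-- One-pass B: returns a '/go/' href eagerly and remembers the first non-empty href as a fallback, replacing A's two scans.


-- ===== PORT A =====
-- href = link.get("href") or ""  (missing key and falsy "" both become "")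
def pvHref (link : List (String × String)) : String := PySem.Dict.getD (PySem.Dict.mk link) "href" ""

-- first loop of A: return the first href containing "hotline.ua/go/" or "/go/"
def pvGoScanA : List (List (String × String)) → Option String
  | [] => none
  | l :: rest =>
    let href := pvHref l
    if PySem.Str.isIn "hotline.ua/go/" href || PySem.Str.isIn "/go/" href then some href
    else pvGoScanA rest

-- second loop of A: return the first non-empty href
def pvFallbackScanA : List (List (String × String)) → Option String
  | [] => none
  | l :: rest =>
    let href := pvHref l
    if href ≠ "" then some href else pvFallbackScanA rest

def pick_offer_url_from_links_py (links : List (List (String × String))) : Option String :=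
  match pvGoScanA links with
  | some h => some h
  | none => pvFallbackScanA links

-- ===== PORT B =====
-- single pass carrying the remembered fallback
def pvOnePassB : List (List (String × String)) → Option String → Option String
  | [], fallback => fallback
  | l :: rest, fallback =>
    let href := pvHref l
    if PySem.Str.isIn "/go/" href then some href
    else pvOnePassB rest (if fallback = none ∧ href ≠ "" then some href else fallback)

def pick_offer_url_from_links_py_alt (links : List (List (String × String))) : Option String :=
  pvOnePassB links none

-- ===== PRECONDITION & SPEC =====
def Spec_pick_offer_url_from_links_py (links : List (List (String × String))) (out : Option String) : Prop := out = pick_offer_url_from_links_py_alt links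
instance (links : List (List (String × String))) (out : Option String) : Decidable (Spec_pick_offer_url_from_links_py links out) := by unfold Spec_pick_offer_url_from_links_py; infer_instance

-- ===== CLAIM (what is proved, stated in full; the proofs are below) =====
def Claim_equal_pick_offer_url_from_links_py : Prop := ∀ (links : List (List (String × String))), Dom_pick_offer_url_from_links_py links → Spec_pick_offer_url_from_links_py links (pick_offer_url_from_links_py links)

-- ===== LEMMAS AND PROOFS =====

-- "hotline.ua/go/" in href implies "/go/" in href, so A's disjunction collapses to the "/go/" test
theorem pv_go_cond (href : String) :
    (PySem.Str.isIn "hotline.ua/go/" href || PySem.Str.isIn "/go/" href) = PySem.Str.isIn "/go/" href := by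
  cases hg : PySem.Str.isIn "/go/" href with
  | true => simp
  | false =>
    simp only [Bool.or_false]
    cases hh : PySem.Str.isIn "hotline.ua/go/" href with
    | false => rfl
    | true =>
      exfalso
      have h1 : ("hotline.ua/go/" : String).toList <:+: href.toList :=
        (PySem.Str.isIn_iff_infix _ _).mp hh
      have h2 : ("/go/" : String).toList <:+: ("hotline.ua/go/" : String).toList := by decide
      have : PySem.Str.isIn "/go/" href = true :=
        (PySem.Str.isIn_iff_infix _ _).mpr (h2.trans h1)
      rw [this] at hg
      exact Bool.noConfusion hg

-- invariant of B's single pass, relating it to A's two scans for any carried fallback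
theorem pvOnePassB_eq (links : List (List (String × String))) :
    ∀ fb, pvOnePassB links fb =
      match pvGoScanA links with
      | some h => some h
      | none => match fb with
        | some f => some f
        | none => pvFallbackScanA links := by
  induction links with
  | nil => intro fb; cases fb <;> rfl
  | cons l rest ih =>
    intro fb
    simp only [pvOnePassB, pvGoScanA, pvFallbackScanA, pv_go_cond]
    cases hc : PySem.Str.isIn "/go/" (pvHref l) with
    | true => simp
    | false =>
      simp only [Bool.false_eq_true, if_false, ih]
      cases hr : pvGoScanA rest with
      | some h => simp
      | none =>
        cases fb with
        | some f => simp
        | none =>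
          by_cases he : pvHref l ≠ "" <;> simp [he]

-- ===== VERDICT (by name: the statement is the Claim_ definition above) =====
theorem pick_offer_url_from_links_py_spec : Claim_equal_pick_offer_url_from_links_py := by
  intro links _
  unfold Spec_pick_offer_url_from_links_py pick_offer_url_from_links_py pick_offer_url_from_links_py_alt
  rw [pvOnePassB_eq]
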